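-- pv_equiv track=rewrite | github.com/PeanutbutterWarrior/Advent-Of-Code | 2024/Day4/Day4.py | search
-- ===== SOURCE A (Python) =====
-- def search(data, offsets, aim):
--     dx, dy = zip(*offsets)
--     min_dx = min(dx)
--     max_dx = max(dx)
--     min_dy = min(dy)
--     max_dy = max(dy)
--
--     count = 0
--     for y in range(-min_dy, len(data) - max_dy):
--         for x in range(-min_dx, len(data[y]) - max_dx):
--             for (dx, dy), target in zip(offsets, aim):
--                 if data[y + dy][x + dx] != target:
--                     break
--             else:
--                 count += 1
--     return count
-- ===== SOURCE B (Python) =====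
-- def search(data, offsets, aim):
--     # one pass over offsets for the window bounds, then staged per-cell filtering
--     lo_x, lo_y = offsets[0]
--     hi_x, hi_y = lo_x, lo_y
--     for dx, dy in offsets:
--         if dx < lo_x:
--             lo_x = dx
--         if dx > hi_x:
--             hi_x = dx
--         if dy < lo_y:
--             lo_y = dy
--         if dy > hi_y:
--             hi_y = dy
--
--     candidates = []
--     for y in range(-lo_y, len(data) - hi_y):
--         for x in range(-lo_x, len(data[y]) - hi_x):
--             candidates.append((y, x))
--
--     for (dx, dy), target in zip(offsets, aim):
--         candidates = [(y, x) for (y, x) in candidates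
--                       if data[y + dy][x + dx] == target]
--     return len(candidates)
-- ===== Notes on version B (the rewrite author's own statement) =====
-- stated objective: alternative
-- what changed: A tests the whole pattern per grid position with a triple nested loop and break; B computes the window bounds in one explicit min/max pass, materialises the candidate-position list once, then narrows it with one filtering pass per (offset,target) pattern cell in order (so later cells are only read for surviving positions, as A's break does), returning the length of the final list.
import Mathlib
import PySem

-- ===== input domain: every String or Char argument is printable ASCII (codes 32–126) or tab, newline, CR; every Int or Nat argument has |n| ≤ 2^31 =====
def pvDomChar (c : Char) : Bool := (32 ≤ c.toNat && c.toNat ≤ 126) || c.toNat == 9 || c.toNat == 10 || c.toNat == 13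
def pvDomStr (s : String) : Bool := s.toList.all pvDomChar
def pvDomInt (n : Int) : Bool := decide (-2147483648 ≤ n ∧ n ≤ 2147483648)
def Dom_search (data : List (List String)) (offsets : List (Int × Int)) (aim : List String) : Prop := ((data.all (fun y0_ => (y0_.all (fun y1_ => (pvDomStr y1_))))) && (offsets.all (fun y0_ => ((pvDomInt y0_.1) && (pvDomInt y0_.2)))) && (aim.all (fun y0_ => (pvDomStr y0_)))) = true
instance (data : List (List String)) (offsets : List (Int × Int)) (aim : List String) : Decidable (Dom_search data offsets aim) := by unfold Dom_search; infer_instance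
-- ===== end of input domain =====

-- B replaces A's per-position triple loop with one min/max pass for the window, a candidate-position
-- list built once, and one filtering pass per pattern cell (alternative decomposition, same cost).

-- ===== PORT A =====
-- data[i][j] under Python indexing (negative wrap); defaults only reachable outside Pre_search
def pvCellA (data : List (List String)) (i j : Int) : String :=
  PySem.List.pyGetD (PySem.List.pyGetD data i []) j ""

-- the 'for (dx, dy), target in zip(offsets, aim): if … != …: break / else:' loop as a Bool
def pvMatchA (data : List (List String)) (y x : Int) : List ((Int × Int) × String) → Bool
  | [] => true
  | ((dx, dy), t) :: rest =>
      if pvCellA data (y + dy) (x + dx) ≠ t then false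
      else pvMatchA data y x rest

def search (data : List (List String)) (offsets : List (Int × Int)) (aim : List String) : Int :=
  if offsets.isEmpty then 0   -- unreachable under Pre_search (Python raises ValueError on empty offsets)
  else
    let dxs := offsets.map Prod.fst
    let dys := offsets.map Prod.snd
    let min_dx := (PySem.List.min? dxs (fun v => v)).getD 0
    let max_dx := (PySem.List.max? dxs (fun v => v)).getD 0
    let min_dy := (PySem.List.min? dys (fun v => v)).getD 0
    let max_dy := (PySem.List.max? dys (fun v => v)).getD 0
    (PySem.List.pyRange (-min_dy) ((data.length : Int) - max_dy) 1).foldl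
      (fun count y =>
        (PySem.List.pyRange (-min_dx)
            (((PySem.List.pyGetD data y []).length : Int) - max_dx) 1).foldl
          (fun count x => if pvMatchA data y x (offsets.zip aim) then count + 1 else count)
          count)
      0

-- ===== PORT B =====
def search_alt (data : List (List String)) (offsets : List (Int × Int)) (aim : List String) : Int :=
  match offsets with
  | [] => 0   -- unreachable under Pre_search (Python B raises IndexError on offsets[0])
  | o :: _ =>
    -- one pass over offsets maintaining (lo_x, hi_x) and (lo_y, hi_y)
    let bounds := offsets.foldl
      (fun (s : (Int × Int) × (Int × Int)) (p : Int × Int) =>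
        ((if p.1 < s.1.1 then p.1 else s.1.1,
          if p.1 > s.1.2 then p.1 else s.1.2),
         (if p.2 < s.2.1 then p.2 else s.2.1,
          if p.2 > s.2.2 then p.2 else s.2.2)))
      ((o.1, o.1), (o.2, o.2))
    -- candidates built once by appending every in-window position
    let candidates : List (Int × Int) :=
      (PySem.List.pyRange (-bounds.2.1) ((data.length : Int) - bounds.2.2) 1).foldl
        (fun cs y =>
          (PySem.List.pyRange (-bounds.1.1)
              (((PySem.List.pyGetD data y []).length : Int) - bounds.1.2) 1).foldl
            (fun cs x => cs ++ [(y, x)]) cs)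
        []
    -- one filtering pass per pattern cell, in offset order
    let survivors :=
      (offsets.zip aim).foldl
        (fun cs p => cs.filter
          (fun q => PySem.List.pyGetD (PySem.List.pyGetD data (q.1 + p.1.2) []) (q.2 + p.1.1) "" == p.2))
        candidates
    (survivors.length : Int)

-- ===== PRECONDITION & SPEC =====
-- Pre_search excludes EXACTLY the inputs on which Python A raises: empty offsets (ValueError from
-- unpacking zip(*offsets)), an outer row index y outside [-len(data), len(data)) (IndexError on
-- len(data[y])), and window positions where some pattern cell i is out of range while all cells
-- before i match their targets (A reads cell i and gets IndexError; after a mismatch the break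
-- means later cells are never read). No input on which A returns a value is excluded.
def Pre_search (data : List (List String)) (offsets : List (Int × Int)) (aim : List String) : Prop :=
  offsets ≠ [] ∧
  ∀ y ∈ PySem.List.pyRange (-((PySem.List.min? (offsets.map Prod.snd) (fun v => v)).getD 0))
          ((data.length : Int) - (PySem.List.max? (offsets.map Prod.snd) (fun v => v)).getD 0) 1,
    (-(data.length : Int) ≤ y ∧ y < (data.length : Int)) ∧
    ∀ x ∈ PySem.List.pyRange (-((PySem.List.min? (offsets.map Prod.fst) (fun v => v)).getD 0))
            (((PySem.List.pyGetD data y []).length : Int) -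
              (PySem.List.max? (offsets.map Prod.fst) (fun v => v)).getD 0) 1,
      ∀ i ∈ List.range (offsets.zip aim).length,
        (((offsets.zip aim).take i).all (fun p =>
            PySem.List.pyGet? (PySem.List.pyGetD data (y + p.1.2) []) (x + p.1.1)
              == some p.2)) = true →
        PySem.Raise.InRange
          (PySem.List.pyGetD data (y + ((offsets.zip aim).getD i ((0, 0), "")).1.2) []).length
          (x + ((offsets.zip aim).getD i ((0, 0), "")).1.1)
instance (data : List (List String)) (offsets : List (Int × Int)) (aim : List String) : Decidable (Pre_search data offsets aim) := by unfold Pre_search; infer_instance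

def pvWitness_search : List (List String) × (List (Int × Int)) × List String :=
  ([["X", "M"], ["A", "S"]], [(0, 0), (1, 0)], ["X", "M"])

def Spec_search (data : List (List String)) (offsets : List (Int × Int)) (aim : List String) (out : Int) : Prop := out = search_alt data offsets aim
instance (data : List (List String)) (offsets : List (Int × Int)) (aim : List String) (out : Int) : Decidable (Spec_search data offsets aim out) := by unfold Spec_search; infer_instance

-- ===== CLAIM (what is proved, stated in full; the proofs are below) =====
def Claim_equal_search : Prop := ∀ (data : List (List String)) (offsets : List (Int × Int)) (aim : List String), Dom_search data offsets aim → Pre_search data offsets aim → Spec_search data offsets aim (search data offsets aim)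

-- ===== LEMMAS AND PROOFS =====

-- A's break-loop is the all-cells-match predicate
theorem pvMatchA_eq_all (data : List (List String)) (y x : Int)
    (ps : List ((Int × Int) × String)) :
    pvMatchA data y x ps = ps.all (fun p => pvCellA data (y + p.1.2) (x + p.1.1) == p.2) := by
  induction ps with
  | nil => rfl
  | cons p rest ih =>
    obtain ⟨⟨dx, dy⟩, t⟩ := p
    simp only [pvMatchA, List.all_cons, ih]
    by_cases h : pvCellA data (y + dy) (x + dx) = t <;> simp [h]

-- B's running min/max pass computes the four extrema of A's min()/max() calls
theorem pv_bounds_fold (l : List (Int × Int)) (a b c d : Int) :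
    l.foldl
      (fun (s : (Int × Int) × (Int × Int)) (p : Int × Int) =>
        ((if p.1 < s.1.1 then p.1 else s.1.1,
          if p.1 > s.1.2 then p.1 else s.1.2),
         (if p.2 < s.2.1 then p.2 else s.2.1,
          if p.2 > s.2.2 then p.2 else s.2.2)))
      ((a, b), (c, d))
      = ((l.foldl (fun m p => min m p.1) a, l.foldl (fun m p => max m p.1) b),
         (l.foldl (fun m p => min m p.2) c, l.foldl (fun m p => max m p.2) d)) := by
  induction l generalizing a b c d with
  | nil => rfl
  | cons p t ih =>
    simp only [List.foldl_cons, ih]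
    congr 2 <;> congr 1 <;> simp [min_def, max_def] <;> split_ifs <;> omega

-- B's nested append loops build the flatMap of the window positions
theorem pv_candidates_fold (ys : List Int) (rx : Int → List Int) :
    ∀ (acc : List (Int × Int)),
      ys.foldl (fun cs y => (rx y).foldl (fun cs x => cs ++ [(y, x)]) cs) acc
        = acc ++ ys.flatMap (fun y => (rx y).map (fun x => (y, x))) := by
  induction ys with
  | nil => simp
  | cons y t ih =>
    intro acc
    rw [List.foldl_cons, ih, PySem.List.foldl_append_singleton_eq_map]
    simp

-- B's repeated filtering counts the positions matching every pattern cell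
theorem foldl_filter_length {α β : Type} (pred : β → α → Bool) :
    ∀ (ps : List β) (cs : List α),
      (ps.foldl (fun cs p => cs.filter (pred p)) cs).length
        = cs.countP (fun c => ps.all (fun p => pred p c)) := by
  intro ps
  induction ps with
  | nil => intro cs; simp
  | cons p rest ih =>
    intro cs
    simp only [List.foldl_cons, ih, List.countP_filter, List.all_cons]
    apply List.countP_congr
    intro c _
    simp [Bool.and_comm]

-- a conditional-increment foldl over Int is the countP, shifted by the start
theorem foldl_count_int {α : Type} (p : α → Bool) :
    ∀ (xs : List α) (c : Int),
      xs.foldl (fun c x => if p x then c + 1 else c) c = c + (xs.countP p : Int) := by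
  intro xs
  induction xs with
  | nil => intro c; simp
  | cons x rest ih =>
    intro c
    rw [List.foldl_cons]
    by_cases h : p x
    · rw [if_pos h, ih, List.countP_cons_of_pos h]
      push_cast
      ring
    · rw [if_neg h, ih, List.countP_cons_of_neg h]

-- A's counting double loop equals the length of the staged filtering of the candidate list
theorem pv_body_eq (data : List (List String)) (pairs : List ((Int × Int) × String))
    (min_dx max_dx min_dy max_dy : Int) :
    (PySem.List.pyRange (-min_dy) ((data.length : Int) - max_dy) 1).foldl
      (fun count y =>
        (PySem.List.pyRange (-min_dx)
            (((PySem.List.pyGetD data y []).length : Int) - max_dx) 1).foldl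
          (fun count x => if pvMatchA data y x pairs then count + 1 else count)
          count)
      0
    = (((pairs.foldl
        (fun cs p => cs.filter
          (fun q => PySem.List.pyGetD (PySem.List.pyGetD data (q.1 + p.1.2) []) (q.2 + p.1.1) "" == p.2))
        ((PySem.List.pyRange (-min_dy) ((data.length : Int) - max_dy) 1).flatMap
          (fun y =>
            (PySem.List.pyRange (-min_dx)
                (((PySem.List.pyGetD data y []).length : Int) - max_dx) 1).map
              (fun x => (y, x))))).length : Nat) : Int) := by
  rw [foldl_filter_length, List.countP_flatMap]
  have inner : ∀ (y : Int) (c : Int),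
      (PySem.List.pyRange (-min_dx)
          (((PySem.List.pyGetD data y []).length : Int) - max_dx) 1).foldl
        (fun count x => if pvMatchA data y x pairs then count + 1 else count) c
      = c + ((((fun cs => cs.countP (fun q => pairs.all
              (fun p => PySem.List.pyGetD (PySem.List.pyGetD data (q.1 + p.1.2) []) (q.2 + p.1.1) "" == p.2))) ∘
            (fun y => (PySem.List.pyRange (-min_dx)
              (((PySem.List.pyGetD data y []).length : Int) - max_dx) 1).map
                (fun x => (y, x)))) y : Nat) : Int) := by
    intro y c
    rw [foldl_count_int]
    have hc : (PySem.List.pyRange (-min_dx)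
          (((PySem.List.pyGetD data y []).length : Int) - max_dx) 1).countP
          (fun x => pvMatchA data y x pairs)
        = ((PySem.List.pyRange (-min_dx)
          (((PySem.List.pyGetD data y []).length : Int) - max_dx) 1).map
            (fun x => (y, x))).countP (fun q => pairs.all
              (fun p => PySem.List.pyGetD (PySem.List.pyGetD data (q.1 + p.1.2) []) (q.2 + p.1.1) "" == p.2)) := by
      rw [List.countP_map]
      apply List.countP_congr
      intro x _
      simp [Function.comp, pvMatchA_eq_all, pvCellA]
    rw [hc]
    simp [Function.comp]
  induction (PySem.List.pyRange (-min_dy) ((data.length : Int) - max_dy) 1) using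
      List.reverseRecOn with
  | nil => simp
  | append_singleton ys y ih =>
    rw [List.foldl_append, List.map_append, List.sum_append, Nat.cast_add]
    simp only [List.foldl_cons, List.foldl_nil, List.map_cons, List.map_nil,
      List.sum_cons, List.sum_nil, Nat.add_zero]
    rw [inner, ih]

theorem search_eq_alt (data : List (List String)) (offsets : List (Int × Int))
    (aim : List String) : search data offsets aim = search_alt data offsets aim := by
  cases offsets with
  | nil => rfl
  | cons o t =>
    unfold search search_alt
    simp only [List.isEmpty_cons, Bool.false_eq_true, if_false]
    rw [pv_bounds_fold, pv_candidates_fold]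
    simp only [List.map_cons, PySem.List.min?_id_cons, PySem.List.max?_id_cons,
      Option.getD_some, List.foldl_map, List.foldl_cons, min_self, max_self,
      List.nil_append]
    exact pv_body_eq data ((o :: t).zip aim) _ _ _ _

-- ===== VERDICT (by name: the statement is the Claim_ definition above) =====
theorem search_spec : Claim_equal_search := by
  intro data offsets aim _ _
  unfold Spec_search
  exact search_eq_alt data offsets aim
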